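-- pv_equiv track=rewrite | github.com/IamVSM/Cybersecurity-Apps | password_strength_analyzer/analyzer.py | _contains_sequence
-- ===== SOURCE A (Python) =====
-- import string
--
-- def _contains_sequence(password: str) -> bool:
--     sequences = [
--         string.ascii_lowercase,
--         string.ascii_uppercase,
--         string.digits,
--         "qwertyuiop",
--         "asdfghjkl",
--         "zxcvbnm",
--     ]
--     for seq in sequences:
--         for i in range(len(seq) - 2):
--             chunk = seq[i : i + 3]
--             if chunk in password:
--                 return True
--     return False
-- ===== SOURCE B (Python) =====
-- import string
--
-- _SEQUENCES = (
--     string.ascii_lowercase,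
--     string.ascii_uppercase,
--     string.digits,
--     "qwertyuiop",
--     "asdfghjkl",
--     "zxcvbnm",
-- )
--
-- # every length-3 substring of the known sequences, built once
-- _TRIGRAMS = frozenset(
--     seq[i : i + 3] for seq in _SEQUENCES for i in range(len(seq) - 2)
-- )
--
-- def _contains_sequence(password: str) -> bool:
--     return any(
--         password[i : i + 3] in _TRIGRAMS for i in range(len(password) - 2)
--     )
-- ===== Notes on version B (the rewrite author's own statement) =====
-- stated objective: idiomatic
-- what changed: Inverts the traversal: instead of scanning the whole password once per known 3-char chunk (76 substring searches), B precomputes the set of all length-3 substrings of the six sequences once at module level and makes a single pass over the password, looking each 3-char window up in that set.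
import Mathlib
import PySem

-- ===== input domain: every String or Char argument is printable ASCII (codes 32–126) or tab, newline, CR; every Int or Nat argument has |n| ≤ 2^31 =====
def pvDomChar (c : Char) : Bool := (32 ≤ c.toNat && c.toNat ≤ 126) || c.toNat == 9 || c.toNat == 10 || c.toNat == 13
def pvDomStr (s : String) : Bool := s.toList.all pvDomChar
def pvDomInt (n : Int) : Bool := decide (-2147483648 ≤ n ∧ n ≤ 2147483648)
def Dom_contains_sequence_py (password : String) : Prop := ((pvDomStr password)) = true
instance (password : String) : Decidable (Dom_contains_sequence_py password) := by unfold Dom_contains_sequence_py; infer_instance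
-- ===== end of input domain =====

-- B inverts the traversal: it builds the set of all length-3 substrings of the six known
-- sequences once and slides a single 3-char window over the password, looking each window up
-- in that set, instead of searching the whole password once per chunk (objective: idiomatic).


-- ===== PORT A =====
-- the six module-level sequence constants (string.ascii_lowercase, …) as lists of chars
def pvSequences : List (List Char) :=
  ["abcdefghijklmnopqrstuvwxyz".toList,
   "ABCDEFGHIJKLMNOPQRSTUVWXYZ".toList,
   "0123456789".toList,
   "qwertyuiop".toList,
   "asdfghjkl".toList,
   "zxcvbnm".toList]

-- A: for each sequence, for each i in range(len(seq)-2), test chunk = seq[i:i+3] in password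
def contains_sequence_py (password : String) : Bool :=
  pvSequences.any (fun seq =>
    (PySem.List.pyRange 0 ((seq.length : Int) - 2) 1).any (fun i =>
      PySem.Chars.isIn (PySem.Chars.slice seq (some i) (some (i + 3))) password.toList))

-- ===== PORT B =====
-- _TRIGRAMS: frozenset of every seq[i:i+3], built once at module level
def pvTrigramList : List (List Char) :=
  pvSequences.flatMap (fun seq =>
    (PySem.List.pyRange 0 ((seq.length : Int) - 2) 1).map (fun i =>
      PySem.Chars.slice seq (some i) (some (i + 3))))

def pvTrigrams : PySem.Set (List Char) := PySem.Set.ofList pvTrigramList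

-- B: any(password[i:i+3] in _TRIGRAMS for i in range(len(password)-2))
def contains_sequence_py_alt (password : String) : Bool :=
  (PySem.List.pyRange 0 ((password.toList.length : Int) - 2) 1).any (fun i =>
    PySem.Set.contains pvTrigrams (PySem.Chars.slice password.toList (some i) (some (i + 3))))

-- ===== PRECONDITION & SPEC =====
def Spec_contains_sequence_py (password : String) (out : Bool) : Prop := out = contains_sequence_py_alt password
instance (password : String) (out : Bool) : Decidable (Spec_contains_sequence_py password out) := by unfold Spec_contains_sequence_py; infer_instance

-- ===== CLAIM (what is proved, stated in full; the proofs are below) =====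
def Claim_equal_contains_sequence_py : Prop := ∀ (password : String), Dom_contains_sequence_py password → Spec_contains_sequence_py password (contains_sequence_py password)

-- ===== LEMMAS AND PROOFS =====

-- every precomputed trigram has length 3
theorem pv_trig_len : ∀ t ∈ pvTrigramList, t.length = 3 := by decide

-- A = "some trigram of the list occurs in the password" (flatten A's two nested loops)
theorem pv_A_eq_any (password : String) :
    contains_sequence_py password =
      pvTrigramList.any (fun t => PySem.Chars.isIn t password.toList) := by
  simp [contains_sequence_py, pvTrigramList, List.any_flatMap, List.any_map, Function.comp_def]

-- core: a length-3 list is a substring of s iff some 3-char window of s equals it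
theorem pv_key (t s : List Char) (ht : t.length = 3) :
    PySem.Chars.isIn t s = true ↔
      ∃ i ∈ PySem.List.pyRange 0 ((s.length : Int) - 2) 1,
        PySem.Chars.slice s (some i) (some (i + 3)) = t := by
  rw [← PySem.Chars.exists_prefix_drop_iff_isIn]
  constructor
  · rintro ⟨j, hpre⟩
    have hlen : t.length ≤ (s.drop j).length := hpre.length_le
    have htake : (s.drop j).take t.length = t := List.prefix_iff_eq_take.mp hpre |>.symm
    rw [ht] at htake
    simp only [List.length_drop] at hlen
    refine ⟨(j : Int), ?_, ?_⟩
    · rw [PySem.List.mem_pyRange_one]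
      constructor
      · exact_mod_cast Nat.zero_le j
      · rw [ht] at hlen; omega
    · have : ((3 : Int)) = ((3 : Nat) : Int) := rfl
      rw [this, PySem.Chars.slice_eq_listSlice, PySem.List.slice_natCast_add]
      exact htake
  · rintro ⟨i, hi, hsl⟩
    rw [PySem.List.mem_pyRange_one] at hi
    obtain ⟨hi0, _⟩ := hi
    obtain ⟨j, rfl⟩ : ∃ j : Nat, (j : Int) = i := ⟨i.toNat, Int.toNat_of_nonneg hi0⟩
    refine ⟨j, ?_⟩
    have : ((3 : Int)) = ((3 : Nat) : Int) := rfl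
    rw [this, PySem.Chars.slice_eq_listSlice, PySem.List.slice_natCast_add] at hsl
    rw [← hsl]
    exact List.take_prefix _ _

-- ===== VERDICT (by name: the statement is the Claim_ definition above) =====
theorem contains_sequence_py_spec : Claim_equal_contains_sequence_py := by
  intro password _
  unfold Spec_contains_sequence_py
  rw [pv_A_eq_any, Bool.eq_iff_iff]
  simp only [contains_sequence_py_alt, List.any_eq_true, pvTrigrams,
    PySem.Set.contains_iff, PySem.Set.mem_ofList]
  constructor
  · rintro ⟨t, ht, hin⟩
    obtain ⟨i, hi, hsl⟩ := (pv_key t password.toList (pv_trig_len t ht)).mp hin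
    exact ⟨i, hi, hsl ▸ ht⟩
  · rintro ⟨i, hi, hmem⟩
    exact ⟨_, hmem, (pv_key _ password.toList (pv_trig_len _ hmem)).mpr ⟨i, hi, rfl⟩⟩
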